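-- pv_equiv track=rewrite | github.com/lanlan47879/adventofcode2020 | day06/day06_part02.py | get_yes_count
-- ===== SOURCE A (Python) =====
-- import string
--
-- def get_yes_count(split_entries):
--     count = 0
--     alphabet = list(string.ascii_lowercase)
--     for split_entry in split_entries:
--         alphabet_counts = [0] * 26
--         entry_count = len(split_entry)
--
--         for entry in split_entry:
--             for letter in alphabet:
--                 if letter in entry:
--                     alphabet_counts[alphabet.index(letter)] += 1
--
--         for alphabet_count in alphabet_counts:
--             if alphabet_count == entry_count:
--                 count += 1
--
--     return count
-- ===== SOURCE B (Python) =====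
-- import string
--
--
-- def get_yes_count(split_entries):
--     # Per group: intersect the set of lowercase letters with each entry's
--     # character set; the survivors are exactly the letters in every entry.
--     total = 0
--     for split_entry in split_entries:
--         common = set(string.ascii_lowercase)
--         for entry in split_entry:
--             common &= set(entry)
--         total += len(common)
--     return total
-- ===== Notes on version B (the rewrite author's own statement) =====
-- stated objective: simpler
-- what changed: Replaces the 26-slot count table (a per-letter substring scan over every entry, then a pass comparing tallies to the group size) by a running set intersection: start from the lowercase alphabet set, intersect with each entry's character set, and add its size; this drops the 26x per-entry substring scans.
import Mathlib
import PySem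

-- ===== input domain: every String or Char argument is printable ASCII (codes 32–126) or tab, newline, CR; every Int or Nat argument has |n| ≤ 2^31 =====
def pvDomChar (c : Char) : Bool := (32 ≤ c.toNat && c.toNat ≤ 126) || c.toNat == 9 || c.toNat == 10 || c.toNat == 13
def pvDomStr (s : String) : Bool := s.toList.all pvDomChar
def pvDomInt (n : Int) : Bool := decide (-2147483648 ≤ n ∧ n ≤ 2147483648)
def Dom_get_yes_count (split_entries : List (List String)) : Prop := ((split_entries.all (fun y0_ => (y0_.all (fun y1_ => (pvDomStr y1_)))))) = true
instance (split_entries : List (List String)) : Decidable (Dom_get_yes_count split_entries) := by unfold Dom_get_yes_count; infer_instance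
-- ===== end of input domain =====

-- B replaces A's 26-slot per-letter count table by a running set intersection over each group; same result, simpler shape.


-- ===== PORT A =====
-- alphabet = list(string.ascii_lowercase)  (a list of 26 one-character strings)
def pyAlphabet : List String :=
  ["a","b","c","d","e","f","g","h","i","j","k","l","m",
   "n","o","p","q","r","s","t","u","v","w","x","y","z"]

-- body of the innermost loop: 'if letter in entry: alphabet_counts[alphabet.index(letter)] += 1'
def updLetter (entry : String) (counts : List Int) (letter : String) : List Int :=
  if PySem.Str.isIn letter entry then
    let i : Nat := (PySem.List.index? pyAlphabet letter).getD 0   -- alphabet.index(letter); always found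
    PySem.List.pySetD counts (i : Int) (PySem.List.pyGetD counts (i : Int) 0 + 1)
  else counts

def get_yes_count (split_entries : List (List String)) : Int :=
  split_entries.foldl (fun count split_entry =>
    let alphabet_counts :=
      split_entry.foldl (fun cnts entry => pyAlphabet.foldl (updLetter entry) cnts)
        (List.replicate 26 (0 : Int))
    alphabet_counts.foldl
      (fun c v => if v == (split_entry.length : Int) then c + 1 else c) count) 0

-- ===== PORT B =====
-- common = set(string.ascii_lowercase)
def lcSet : PySem.Set Char := PySem.Set.ofList "abcdefghijklmnopqrstuvwxyz".toList

def get_yes_count_alt (split_entries : List (List String)) : Int :=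
  split_entries.foldl (fun total split_entry =>
    total + PySem.Set.len
      (split_entry.foldl
        (fun common entry => PySem.Set.inter common (PySem.Set.ofList entry.toList)) lcSet)) 0

-- ===== PRECONDITION & SPEC =====
def Spec_get_yes_count (split_entries : List (List String)) (out : Int) : Prop := out = get_yes_count_alt split_entries
instance (split_entries : List (List String)) (out : Int) : Decidable (Spec_get_yes_count split_entries out) := by unfold Spec_get_yes_count; infer_instance

-- ===== CLAIM (what is proved, stated in full; the proofs are below) =====
def Claim_equal_get_yes_count : Prop := ∀ (split_entries : List (List String)), Dom_get_yes_count split_entries → Spec_get_yes_count split_entries (get_yes_count split_entries)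


-- ===== LEMMAS AND PROOFS =====
-- alphabet.index(letter) as a Nat (always found for letters of pyAlphabet)
def aidx (a : String) : Nat := (PySem.List.index? pyAlphabet a).getD 0

def lcChars : List Char := "abcdefghijklmnopqrstuvwxyz".toList

theorem length_updLetter (entry : String) (counts : List Int) (a : String) :
    (updLetter entry counts a).length = counts.length := by
  unfold updLetter
  split
  · simp
  · rfl

theorem length_foldl_upd (entry : String) (L : List String) :
    ∀ counts : List Int, (L.foldl (updLetter entry) counts).length = counts.length := by
  induction L with
  | nil => intro counts; rfl
  | cons a L ih => intro counts; simp [List.foldl_cons, ih, length_updLetter]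

theorem length_groupFold (g : List String) :
    ∀ counts : List Int,
      (g.foldl (fun cnts entry => pyAlphabet.foldl (updLetter entry) cnts) counts).length
        = counts.length := by
  induction g with
  | nil => intro counts; rfl
  | cons e g ih => intro counts; simp [List.foldl_cons, ih, length_foldl_upd]

theorem updLetter_getD (entry a : String) (counts : List Int)
    (ha : aidx a < counts.length) (i : Nat) :
    PySem.List.pyGetD (updLetter entry counts a) (i : Int) 0
      = PySem.List.pyGetD counts (i : Int) 0
        + (if PySem.Str.isIn a entry && (aidx a == i) then 1 else 0) := by
  unfold updLetter aidx
  unfold aidx at ha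
  by_cases h : PySem.Str.isIn a entry
  · simp only [h, if_true, Bool.true_and]
    rw [PySem.List.pyGetD_pySetD_natCast _ _ _ _ _ ha]
    by_cases hia : i = (PySem.List.index? pyAlphabet a).getD 0
    · rw [if_pos hia, if_pos (by rw [hia]; exact beq_self_eq_true _), hia]
    · rw [if_neg hia, if_neg (by
        intro hc
        exact hia ((beq_iff_eq.mp hc).symm)), add_zero]
  · have h' : PySem.Chars.isIn a.toList entry.toList = false := by simpa using h
    rw [if_neg h, if_neg (by simp [h']), add_zero]

theorem foldl_upd_getD (entry : String) (L : List String) :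
    ∀ counts : List Int, (∀ a ∈ L, aidx a < counts.length) → ∀ i : Nat,
      PySem.List.pyGetD (L.foldl (updLetter entry) counts) (i : Int) 0
        = PySem.List.pyGetD counts (i : Int) 0
          + (L.countP (fun a => PySem.Str.isIn a entry && (aidx a == i)) : Int) := by
  induction L with
  | nil => intro counts _ i; simp
  | cons a L ih =>
      intro counts h i
      simp only [List.foldl_cons, List.countP_cons]
      rw [ih _ (fun b hb => by
            rw [length_updLetter]; exact h b (List.mem_cons_of_mem _ hb)) i,
          updLetter_getD entry a counts (h a List.mem_cons_self) i]
      split_ifs <;> push_cast <;> ring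

theorem aidx_lt : ∀ a ∈ pyAlphabet, aidx a < 26 := by decide

theorem filter_aidx (i : Nat) (hi : i < 26) :
    pyAlphabet.filter (fun a => aidx a == i) = [pyAlphabet.getD i ""] := by
  interval_cases i <;> decide

theorem countP_alpha (entry : String) (i : Nat) (hi : i < 26) :
    pyAlphabet.countP (fun a => PySem.Str.isIn a entry && (aidx a == i))
      = if PySem.Str.isIn (pyAlphabet.getD i "") entry then 1 else 0 := by
  rw [← List.countP_filter (q := fun a => aidx a == i), filter_aidx i hi]
  simp [List.countP_cons]

theorem group_counts (g : List String) :
    ∀ counts : List Int, counts.length = 26 → ∀ i : Nat, i < 26 →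
      PySem.List.pyGetD
          (g.foldl (fun cnts entry => pyAlphabet.foldl (updLetter entry) cnts) counts) (i : Int) 0
        = PySem.List.pyGetD counts (i : Int) 0
          + (g.countP (fun e => PySem.Str.isIn (pyAlphabet.getD i "") e) : Int) := by
  induction g with
  | nil => intro counts _ i _; simp
  | cons e g ih =>
      intro counts hc i hi
      simp only [List.foldl_cons, List.countP_cons]
      rw [ih _ (by rw [length_foldl_upd]; exact hc) i hi,
          foldl_upd_getD e pyAlphabet counts (fun a ha => by rw [hc]; exact aidx_lt a ha) i,
          countP_alpha e i hi]
      split_ifs <;> push_cast <;> ring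

theorem counts_final (g : List String) :
    g.foldl (fun cnts entry => pyAlphabet.foldl (updLetter entry) cnts)
        (List.replicate 26 (0 : Int))
      = (List.range 26).map
          (fun i => (g.countP (fun e => PySem.Str.isIn (pyAlphabet.getD i "") e) : Int)) := by
  have hlen : (g.foldl (fun cnts entry => pyAlphabet.foldl (updLetter entry) cnts)
      (List.replicate 26 (0 : Int))).length = 26 := by
    rw [length_groupFold]; simp
  apply List.ext_getElem
  · rw [hlen]; simp
  · intro i h1 h2
    have hi : i < 26 := by simpa using h2
    have key := group_counts g (List.replicate 26 0) (by simp) i hi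
    rw [PySem.List.pyGetD_eq_getElem _ 0 (by positivity) (by rw [hlen]; exact_mod_cast hi),
        PySem.List.pyGetD_eq_getElem _ 0 (by positivity) (by simp; exact_mod_cast hi)] at key
    simp only [Int.toNat_natCast] at key
    rw [List.getElem_replicate, zero_add] at key
    refine key.trans ?_
    simp [List.getD]

theorem lcSet_eq : lcSet = lcChars := by decide

theorem B_fold (g : List String) :
    ∀ s : List Char,
      g.foldl (fun common e => PySem.Set.inter common (PySem.Set.ofList e.toList)) s
        = s.filter (fun c => g.all (fun e => (PySem.Set.ofList e.toList).contains c)) := by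
  induction g with
  | nil => intro s; simp
  | cons e g ih =>
      intro s
      rw [List.foldl_cons, ih]
      simp only [PySem.Set.inter, List.filter_filter]
      apply List.filter_congr
      intro c _
      simp [List.all_cons, Bool.and_comm]

theorem mem_iff_singleton_infix {c : Char} {l : List Char} : [c] <:+: l ↔ c ∈ l := by
  constructor
  · intro h; exact List.singleton_sublist.mp h.sublist
  · intro h
    obtain ⟨s, t, rfl⟩ := List.mem_iff_append.mp h
    exact ⟨s, t, by simp⟩

theorem isIn_single (i : Nat) (hi : i < 26) (e : String) :
    PySem.Str.isIn (pyAlphabet.getD i "") e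
      = (PySem.Set.ofList e.toList).contains (lcChars.getD i ' ') := by
  have htl : (pyAlphabet.getD i "").toList = [lcChars.getD i ' '] := by
    interval_cases i <;> decide
  by_cases h : lcChars.getD i ' ' ∈ e.toList
  · rw [(PySem.Str.isIn_iff_infix _ _).mpr (by rw [htl]; exact mem_iff_singleton_infix.mpr h)]
    symm
    have h' : lcChars[i]?.getD ' ' ∈ e.toList := h
    simp [PySem.Set.mem_ofList, h']
  · have hne : ¬ PySem.Str.isIn (pyAlphabet.getD i "") e = true := by
      rw [PySem.Str.isIn_iff_infix, htl, mem_iff_singleton_infix]; exact h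
    simp only [Bool.not_eq_true] at hne
    rw [hne]; symm
    have h' : lcChars[i]?.getD ' ' ∉ e.toList := h
    simp [PySem.Set.mem_ofList, h']

theorem lc_map : lcChars = (List.range 26).map (fun i => lcChars.getD i ' ') := by decide

theorem group_eq (g : List String) :
    (List.range 26).countP
        (fun i => (g.countP (fun e => PySem.Str.isIn (pyAlphabet.getD i "") e) : Int)
          == (g.length : Int))
      = (lcChars.filter (fun c => g.all (fun e => (PySem.Set.ofList e.toList).contains c))).length := by
  rw [← List.countP_eq_length_filter]
  conv_rhs => rw [lc_map]
  rw [List.countP_map]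
  apply List.countP_congr
  intro i hi
  have hi' : i < 26 := by simpa using hi
  have hpe : ∀ e, PySem.Str.isIn (pyAlphabet.getD i "") e
      = (PySem.Set.ofList e.toList).contains (lcChars.getD i ' ') := isIn_single i hi'
  simp only [Function.comp, hpe]
  rw [beq_iff_eq, Nat.cast_inj, List.countP_eq_length]
  exact (List.all_eq_true).symm

theorem step_eq (count : Int) (g : List String) :
    (g.foldl (fun cnts entry => pyAlphabet.foldl (updLetter entry) cnts)
        (List.replicate 26 (0 : Int))).foldl
      (fun c v => if v == (g.length : Int) then c + 1 else c) count
      = count + PySem.Set.len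
          (g.foldl (fun common entry =>
            PySem.Set.inter common (PySem.Set.ofList entry.toList)) lcSet) := by
  rw [PySem.List.foldl_count_if, counts_final g, List.countP_map, lcSet_eq, B_fold]
  simp only [PySem.Set.len, Function.comp_def]
  rw [group_eq g]

theorem folds_eq (ses : List (List String)) : ∀ acc : Int,
    ses.foldl (fun count split_entry =>
      let alphabet_counts :=
        split_entry.foldl (fun cnts entry => pyAlphabet.foldl (updLetter entry) cnts)
          (List.replicate 26 (0 : Int))
      alphabet_counts.foldl
        (fun c v => if v == (split_entry.length : Int) then c + 1 else c) count) acc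
      = ses.foldl (fun total split_entry =>
          total + PySem.Set.len
            (split_entry.foldl
              (fun common entry =>
                PySem.Set.inter common (PySem.Set.ofList entry.toList)) lcSet)) acc := by
  induction ses with
  | nil => intro acc; rfl
  | cons g ses ih =>
      intro acc
      simp only [List.foldl_cons]
      rw [step_eq, ih]

-- ===== VERDICT (by name: the statement is the Claim_ definition above) =====
theorem get_yes_count_spec : Claim_equal_get_yes_count := by
  intro ses _
  unfold Spec_get_yes_count get_yes_count get_yes_count_alt
  exact folds_eq ses 0
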